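-- pv_equiv track=rewrite | github.com/thomas783/coding_test | baekjoon/bfs/13460.py | tilt_left
-- ===== SOURCE A (Python) =====
-- import copy
--
-- def tilt_left(temp_map) : # 왼쪽으로 기울이는 함수
--     maps = copy.deepcopy(temp_map)
--     out = []
--     for m in range(len(maps)) :
--         for n in range(len(maps[m])) :
--             if maps[m][n] == 'B' :
--                 a,b = m,n
--                 while maps[a][b] == 'B' and maps[a][b-1] == '.' :
--                     maps[a][b-1] = 'B'; maps[a][b] = '.'
--                     b -= 1
--                 if maps[a][b-1] == 'O' :
--                     maps[a][b] = '.'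
--                     out.append('B')
--             if maps[m][n] == 'R' :
--                 a,b = m,n
--                 while maps[a][b] == 'R' and maps[a][b-1] == '.' :
--                     maps[a][b-1] = 'R'; maps[a][b] = '.'
--                     b -= 1
--                 if maps[a][b-1] == 'O' :
--                     maps[a][b] = '.'
--                     out.append('R')
--     return maps,out
-- ===== SOURCE B (Python) =====
-- def tilt_left(temp_map):  # single left-to-right scan per row with a landing index and a hole flag
--     maps = [list(row) for row in temp_map]
--     out = []
--     for row in maps:
--         land = 0
--         hole = False
--         for i in range(len(row)):
--             c = row[i]
--             if c == 'B' or c == 'R':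
--                 if hole:
--                     row[i] = '.'
--                     out.append(c)
--                 else:
--                     row[i] = '.'
--                     row[land] = c
--                     land += 1
--             elif c != '.':
--                 land = i + 1
--                 hole = (c == 'O')
--     return maps, out
-- ===== Notes on version B (the rewrite author's own statement) =====
-- stated objective: simpler
-- what changed: B replaces A's per-ball cell-by-cell inner while loop (re-scanning and rewriting the row for every ball) by a single left-to-right scan per row that keeps a landing index and a hole flag, placing or dropping each ball in O(1).
-- intended difference: On boards with a row (length >= 2) whose first non-'.' cell is a ball and whose last cell is 'O', A slides the ball to column 0, consults the wrapped index maps[a][-1] and drops the ball into the hole at the opposite end of the row; B parks it at column 0, the intended left-tilt result. — e.g. on tilt_left([[".", "B", "O"]]): A returns ([[".", ".", "O"]], ["B"]), B returns ([["B", ".", "O"]], [])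
-- outside the precondition, e.g. on tilt_left([['R', 'B', '.']]): A returns ([['B', 'R', '.']], []), B returns ([['R', 'B', '.']], [])
import Mathlib
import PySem

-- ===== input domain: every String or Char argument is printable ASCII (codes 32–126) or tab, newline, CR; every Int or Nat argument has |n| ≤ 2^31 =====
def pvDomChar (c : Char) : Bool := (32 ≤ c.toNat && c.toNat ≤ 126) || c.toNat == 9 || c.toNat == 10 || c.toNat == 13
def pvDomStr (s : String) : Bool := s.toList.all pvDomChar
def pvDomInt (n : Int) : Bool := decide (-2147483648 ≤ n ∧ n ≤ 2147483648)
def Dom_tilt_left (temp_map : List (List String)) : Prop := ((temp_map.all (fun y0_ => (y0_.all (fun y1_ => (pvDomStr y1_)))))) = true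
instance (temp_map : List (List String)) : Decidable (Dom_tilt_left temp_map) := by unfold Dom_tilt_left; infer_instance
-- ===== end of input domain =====

-- B replaces A's per-ball one-cell-at-a-time inner while loop by a single left-to-right
-- scan per row with a landing index and a hole flag (objective: simpler / O(L) per row).

-- ===== PORT A =====

-- the inner 'while maps[a][b] == colour and maps[a][b-1] == '.'' loop; none = IndexError,
-- fuel is an upper bound on the iterations Python can make before it raises
def pvSlideA (colour : String) (row : List String) (b : Int) : Nat → Option (List String × Int)
  | 0 => none
  | fuel + 1 =>
    match PySem.List.pyGet? row b, PySem.List.pyGet? row (b - 1) with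
    | some c, some l =>
      if c = colour ∧ l = "." then
        pvSlideA colour (PySem.List.pySetD (PySem.List.pySetD row (b - 1) colour) b ".") (b - 1) fuel
      else some (row, b)
    | _, _ => none

-- the body of 'if maps[m][n] == colour: … while … ; if maps[a][b-1] == 'O': …'
def pvBallA (colour : String) (row : List String) (n : Int) (out : List String) :
    Option (List String × List String) :=
  match pvSlideA colour row n (n.toNat + row.length + 2) with
  | none => none
  | some (r, b) =>
    match PySem.List.pyGet? r (b - 1) with
    | none => none
    | some l =>
      if l = "O" then some (PySem.List.pySetD r b ".", out ++ [colour])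
      else some (r, out)

def pvStepA (st : Option (List String × List String)) (n : Int) :
    Option (List String × List String) :=
  match st with
  | none => none
  | some (r, out) =>
    match (if PySem.List.pyGetD r n "" = "B" then pvBallA "B" r n out else some (r, out)) with
    | none => none
    | some (r1, out1) =>
      if PySem.List.pyGetD r1 n "" = "R" then pvBallA "R" r1 n out1 else some (r1, out1)

-- 'for n in range(len(maps[m])): …' on one row
def pvRowA (row : List String) (out : List String) : Option (List String × List String) :=
  (PySem.List.pyRange 0 (PySem.List.len row) 1).foldl pvStepA (some (row, out))

-- 'for m in range(len(maps)): …'; on the inputs Pre_ excludes (IndexError) the port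
-- returns ([], []) — nothing is claimed there
def tilt_left (temp_map : List (List String)) : List (List String) × List String :=
  match temp_map.foldl
      (fun st row =>
        match st with
        | none => none
        | some (acc, out) =>
          match pvRowA row out with
          | none => none
          | some (r, o) => some (acc ++ [r], o))
      (some (([] : List (List String)), ([] : List String))) with
  | none => ([], [])
  | some s => s

-- ===== PORT B =====

def pvStepB (s : List String × Nat × Bool × List String) (i : Nat) :
    List String × Nat × Bool × List String :=
  let (r, land, hole, out) := s
  let c := r.getD i ""
  if c = "B" ∨ c = "R" then
    if hole then (r.set i ".", land, hole, out ++ [c])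
    else ((r.set i ".").set land c, land + 1, hole, out)
  else if c ≠ "." then (r, i + 1, c == "O", out)
  else s

-- one row of Source B's scan: landing index + hole flag
def pvRowB (row : List String) (out : List String) : List String × List String :=
  let s := (List.range row.length).foldl pvStepB (row, 0, false, out)
  (s.1, s.2.2.2)

def tilt_left_alt (temp_map : List (List String)) : List (List String) × List String :=
  temp_map.foldl
    (fun (st : List (List String) × List String) row =>
      let p := pvRowB row st.2
      (st.1 ++ [p.1], p.2))
    ([], [])

-- ===== PRECONDITION & SPEC =====

-- Pre_ excludes the rows that send A's while loop off the left edge into Python's negative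
-- indexing with nothing at the row's right end (first non-'.' cell is a ball, last cell '.'):
-- there A either raises IndexError (when that ball is the row's only non-'.' cell) or carries
-- the ball clear around the row to an accidental wraparound position.
def Pre_tilt_left (temp_map : List (List String)) : Prop :=
  ∀ r ∈ temp_map,
    ¬(2 ≤ r.length ∧ (r.filter (· != ".") = ["B"] ∨ r.filter (· != ".") = ["R"])) ∧
    ¬(2 ≤ r.length ∧ (r.find? (· != ".") = some "B" ∨ r.find? (· != ".") = some "R") ∧
      r.getLast? = some ".")
instance (temp_map : List (List String)) : Decidable (Pre_tilt_left temp_map) := by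
  unfold Pre_tilt_left; infer_instance

def pvWitness_tilt_left : List (List String) := [["#", "B", ".", "O", "R"]]

-- On rows (length ≥ 2) whose first non-'.' cell is a ball and whose last cell is 'O', A's ball
-- reaches column 0, A consults the wrapped index maps[a][-1] and drops the ball into the hole
-- at the opposite end of the row; B parks it at column 0, the intended left-tilt result.
def D_tilt_left (temp_map : List (List String)) : Prop :=
  ∃ r ∈ temp_map,
    2 ≤ r.length ∧
    (r.find? (· != ".") = some "B" ∨ r.find? (· != ".") = some "R") ∧
    r.getLast? = some "O"
instance (temp_map : List (List String)) : Decidable (D_tilt_left temp_map) := by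
  unfold D_tilt_left; infer_instance

def Spec_tilt_left (temp_map : List (List String)) (out : List (List String) × List String) : Prop :=
  ¬ D_tilt_left temp_map → out = tilt_left_alt temp_map
instance (temp_map : List (List String)) (out : List (List String) × List String) :
    Decidable (Spec_tilt_left temp_map out) := by unfold Spec_tilt_left; infer_instance

def pvDiffWitness_tilt_left : List (List String) := [[".", "B", "O"]]
def pvDiffWitnessOut_tilt_left :
    (List (List String) × List String) × (List (List String) × List String) :=
  (([[".", ".", "O"]], ["B"]), ([["B", ".", "O"]], []))

-- ===== CLAIM (what is proved, stated in full; the proofs are below) =====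
def Claim_unchanged_tilt_left : Prop := ∀ (temp_map : List (List String)), Dom_tilt_left temp_map → Pre_tilt_left temp_map → Spec_tilt_left temp_map (tilt_left temp_map)
def Claim_exact_tilt_left : Prop := ∀ (temp_map : List (List String)), Dom_tilt_left temp_map → Pre_tilt_left temp_map → D_tilt_left temp_map → tilt_left temp_map ≠ tilt_left_alt temp_map
def Claim_changed_tilt_left : Prop := Dom_tilt_left (pvDiffWitness_tilt_left) ∧ Pre_tilt_left (pvDiffWitness_tilt_left) ∧ D_tilt_left (pvDiffWitness_tilt_left) ∧ tilt_left (pvDiffWitness_tilt_left) = pvDiffWitnessOut_tilt_left.1 ∧ tilt_left_alt (pvDiffWitness_tilt_left) = pvDiffWitnessOut_tilt_left.2 ∧ pvDiffWitnessOut_tilt_left.1 ≠ pvDiffWitnessOut_tilt_left.2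


-- ===== LEMMAS AND PROOFS =====

-- per-row forms of Pre_ and D_
def pvRaiseRow (r : List String) : Prop :=
  2 ≤ r.length ∧ (r.filter (· != ".") = ["B"] ∨ r.filter (· != ".") = ["R"])

def pvDRow (r : List String) : Prop :=
  2 ≤ r.length ∧
  (r.find? (· != ".") = some "B" ∨ r.find? (· != ".") = some "R") ∧
  (r.getLast? = some "." ∨ r.getLast? = some "O")

theorem pv_set_self {α : Type} (l : List α) (i : Nat) (v : α) (h : l[i]? = some v) :
    l.set i v = l := by
  apply List.ext_getElem?
  intro j
  by_cases hj : j = i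
  · subst hj
    rw [List.getElem?_set_self (List.getElem?_eq_some_iff.mp h).1, h]
  · exact List.getElem?_set_ne (fun he => hj he.symm)

theorem pv_slide_eq (colour : String) (r : List String) (land n fuel : Nat)
    (hn : n < r.length)
    (hball : r[n]? = some colour)
    (hdots : ∀ j, land ≤ j → j < n → r[j]? = some ".")
    (v : String) (hstop : PySem.List.pyGet? r ((land : Int) - 1) = some v) (hv : v ≠ ".")
    (hland : land ≤ n)
    (hidx : land = 0 → 0 < n → n + 1 < r.length)
    (hfuel : n - land < fuel) :
    pvSlideA colour r (n : Int) fuel = some ((r.set n ".").set land colour, (land : Int)) := by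
  induction fuel generalizing r n v with
  | zero => omega
  | succ f ih =>
    have h1 : PySem.List.pyGet? r (n : Int) = some colour := by
      rw [PySem.List.pyGet?_natCast, hball]
    by_cases hnl : n = land
    · subst hnl
      simp only [pvSlideA, h1, hstop]
      rw [if_neg (by rintro ⟨-, h⟩; exact hv h)]
      rw [List.set_set, pv_set_self r n colour hball]
    · have hn1 : 1 ≤ n := by omega
      have hcast : (n : Int) - 1 = ((n - 1 : Nat) : Int) := by omega
      have hdot : r[n-1]? = some "." := hdots (n-1) (by omega) (by omega)
      have h2 : PySem.List.pyGet? r ((n : Int) - 1) = some "." := by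
        rw [hcast, PySem.List.pyGet?_natCast, hdot]
      simp only [pvSlideA, h1, h2]
      rw [if_pos (by simp)]
      rw [hcast, PySem.List.pySetD_natCast, PySem.List.pySetD_natCast]
      set r' : List String := (r.set (n-1) colour).set n "." with hr'
      have hlen' : r'.length = r.length := by simp [hr']
      have hres : pvSlideA colour r' ((n - 1 : Nat) : Int) f =
          some ((r'.set (n-1) ".").set land colour, (land : Int)) := by
        apply ih r' (n-1)
        · omega
        · rw [hr', List.getElem?_set_ne (by omega : n ≠ n - 1),
            List.getElem?_set_self (by omega)]
        · intro j hj1 hj2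
          rw [hr', List.getElem?_set_ne (by omega : n ≠ j),
            List.getElem?_set_ne (by omega : n - 1 ≠ j)]
          exact hdots j hj1 (by omega)
        · -- stop cell unchanged
          by_cases hl0 : land = 0
          · subst hl0
            have hnn : n + 1 < r.length := hidx rfl (by omega)
            have : ((0:Nat) : Int) - 1 = -1 := by omega
            rw [this] at hstop ⊢
            rw [PySem.List.pyGet?_neg_one] at hstop ⊢
            rw [List.getLast?_eq_getElem?] at hstop ⊢
            rw [hlen', hr', List.getElem?_set_ne (by omega : n ≠ r.length - 1),
              List.getElem?_set_ne (by omega : n - 1 ≠ r.length - 1)]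
            exact hstop
          · have hcast2 : ((land:Nat) : Int) - 1 = ((land - 1 : Nat) : Int) := by omega
            rw [hcast2, PySem.List.pyGet?_natCast] at hstop ⊢
            rw [hr', List.getElem?_set_ne (by omega : n ≠ land - 1),
              List.getElem?_set_ne (by omega : n - 1 ≠ land - 1)]
            exact hstop
        · exact hv
        · omega
        · intro h0 hpos
          rw [hlen']
          have := hidx h0 (by omega)
          omega
        · omega
      rw [hres]
      have hrow : r'.set (n-1) "." = r.set n "." := by
        rw [hr', List.set_comm "." "." (by omega : n ≠ n - 1), List.set_set,
          pv_set_self r (n-1) "." hdot]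
      rw [hrow]

theorem pv_ball_eq (colour : String) (r : List String) (land n : Nat) (out : List String)
    (hn : n < r.length)
    (hball : r[n]? = some colour)
    (hdots : ∀ j, land ≤ j → j < n → r[j]? = some ".")
    (v : String) (hstop : PySem.List.pyGet? r ((land : Int) - 1) = some v) (hv : v ≠ ".")
    (hland : land ≤ n)
    (hidx : land = 0 → 0 < n → n + 1 < r.length) :
    pvBallA colour r (n : Int) out =
      if v = "O" then some (r.set n ".", out ++ [colour])
      else some ((r.set n ".").set land colour, out) := by
  unfold pvBallA
  have hfuel : n - land < (n : Int).toNat + r.length + 2 := by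
    simp only [Int.toNat_natCast]; omega
  rw [pv_slide_eq colour r land n _ hn hball hdots v hstop hv hland hidx hfuel]
  have hself : land = n → (r.set n ".").set land colour = r.set n colour := by
    intro h; subst h; rw [List.set_set]
  have hstop1 : PySem.List.pyGet? ((r.set n ".").set land colour) ((land : Int) - 1) = some v := by
    by_cases hl0 : land = 0
    · subst hl0
      have hc : ((0:Nat) : Int) - 1 = -1 := by omega
      rw [hc] at hstop ⊢
      by_cases hn0 : n = 0
      · subst hn0
        rw [List.set_set, pv_set_self r 0 colour hball]
        exact hstop
      · have hnn : n + 1 < r.length := hidx rfl (by omega)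
        rw [PySem.List.pyGet?_neg_one] at hstop ⊢
        rw [List.getLast?_eq_getElem?] at hstop ⊢
        simp only [List.length_set]
        rw [List.getElem?_set_ne (by omega : 0 ≠ r.length - 1),
          List.getElem?_set_ne (by omega : n ≠ r.length - 1)]
        exact hstop
    · have hc : ((land:Nat) : Int) - 1 = ((land - 1 : Nat) : Int) := by omega
      rw [hc, PySem.List.pyGet?_natCast] at hstop ⊢
      rw [List.getElem?_set_ne (by omega : land ≠ land - 1),
        List.getElem?_set_ne (by omega : n ≠ land - 1)]
      exact hstop
  dsimp only
  rw [hstop1]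
  dsimp only
  by_cases hO : v = "O"
  · rw [if_pos hO, if_pos hO]
    have hland2 : land < ((r.set n ".").set land colour).length := by
      simp only [List.length_set]; omega
    rw [PySem.List.pySetD_natCast, List.set_set]
    have hdot2 : (r.set n ".")[land]? = some "." := by
      by_cases hln : land = n
      · subst hln; exact List.getElem?_set_self hn
      · rw [List.getElem?_set_ne (by omega : n ≠ land)]
        exact hdots land le_rfl (by omega)
    rw [pv_set_self _ land "." hdot2]
  · rw [if_neg hO, if_neg hO]

theorem pv_find_prefix (l : List String) (n : Nat) (c : String)
    (hpre : ∀ j, j < n → l[j]? = some ".") (hc : l[n]? = some c) (hne : c ≠ ".") :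
    l.find? (· != ".") = some c := by
  induction n generalizing l with
  | zero =>
    cases l with
    | nil => simp at hc
    | cons a t =>
      simp only [List.getElem?_cons_zero, Option.some.injEq] at hc
      subst hc
      rw [List.find?_cons_of_pos (by simpa using hne)]
  | succ n ih =>
    cases l with
    | nil => simp at hc
    | cons a t =>
      have h0 : a = "." := by
        have := hpre 0 (by omega)
        simpa using this
      subst h0
      rw [List.find?_cons_of_neg (by simp)]
      exact ih t (fun j hj => by simpa using hpre (j+1) (by omega)) (by simpa using hc)

theorem pv_filter_single (l : List String) (n : Nat) (c : String)
    (hpre : ∀ j, j < n → l[j]? = some ".") (hc : l[n]? = some c) (hne : c ≠ ".")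
    (hsuf : ∀ j, n < j → j < l.length → l[j]? = some ".") :
    l.filter (· != ".") = [c] := by
  induction n generalizing l with
  | zero =>
    cases l with
    | nil => simp at hc
    | cons a t =>
      simp only [List.getElem?_cons_zero, Option.some.injEq] at hc
      subst hc
      rw [List.filter_cons_of_pos (by simpa using hne)]
      have ht : t.filter (· != ".") = [] := by
        rw [List.filter_eq_nil_iff]
        intro x hx
        obtain ⟨i, hi⟩ := List.getElem?_of_mem hx
        have : x = "." := by
          have := hsuf (i+1) (by omega) (by
            simp only [List.length_cons]
            have := (List.getElem?_eq_some_iff.mp hi).1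
            omega)
          simp only [List.getElem?_cons_succ] at this
          rw [hi] at this
          exact (Option.some.injEq _ _).mp this
        simp [this]
      rw [ht]
  | succ n ih =>
    cases l with
    | nil => simp at hc
    | cons a t =>
      have h0 : a = "." := by
        have := hpre 0 (by omega)
        simpa using this
      subst h0
      rw [List.filter_cons_of_neg (by simp)]
      exact ih t (fun j hj => by simpa using hpre (j+1) (by omega)) (by simpa using hc)
        (fun j hj hjl => by
          have := hsuf (j+1) (by omega) (by simpa using Nat.add_lt_add_right hjl 1)
          simpa using this)

theorem pv_row_inv (r₀ out₀ : List String)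
    (hND : ¬ pvDRow r₀) (hNR : ¬ pvRaiseRow r₀) :
    ∀ n, n ≤ r₀.length →
    ∃ r land hole out,
      (List.range n).foldl pvStepB (r₀, 0, false, out₀) = (r, land, hole, out) ∧
      (List.range n).foldl (fun st (k : Nat) => pvStepA st (k : Int)) (some (r₀, out₀)) = some (r, out) ∧
      r.length = r₀.length ∧
      land ≤ n ∧
      (∀ j, land ≤ j → j < n → r[j]? = some ".") ∧
      (∀ j, n ≤ j → r[j]? = r₀[j]?) ∧
      (land = 0 → hole = false ∧ ∀ j, j < n → r₀[j]? = some ".") ∧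
      (1 ≤ land → ∃ v, r[land - 1]? = some v ∧ v ≠ "." ∧ hole = (v == "O")) := by
  intro n
  induction n with
  | zero =>
    intro _
    exact ⟨r₀, 0, false, out₀, rfl, rfl, rfl, le_rfl,
      fun j _ hj => absurd hj (by omega),
      fun j _ => rfl,
      fun _ => ⟨rfl, fun j hj => absurd hj (by omega)⟩,
      fun h1 => absurd h1 (by omega)⟩
  | succ n ih =>
    intro hn1
    obtain ⟨r, land, hole, out, hB, hA, hlen, hland, hdots, hsuf, hzero, hstopinv⟩ := ih (by omega)
    have hnL : n < r₀.length := by omega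
    obtain ⟨c, hc⟩ : ∃ c, r₀[n]? = some c := ⟨r₀[n], List.getElem?_eq_getElem hnL⟩
    have hrn : r[n]? = some c := by rw [hsuf n le_rfl]; exact hc
    have hrnL : n < r.length := by omega
    have hgetD : r.getD n "" = c := by rw [List.getD_eq_getElem?_getD, hrn]; rfl
    have hBfold : (List.range (n+1)).foldl pvStepB (r₀, 0, false, out₀) =
        pvStepB (r, land, hole, out) n := by
      rw [List.range_succ, List.foldl_append, hB]
      simp only [List.foldl_cons, List.foldl_nil]
    have hAfold : (List.range (n+1)).foldl (fun st (k : Nat) => pvStepA st (k : Int)) (some (r₀, out₀)) =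
        pvStepA (some (r, out)) (n : Int) := by
      rw [List.range_succ, List.foldl_append, hA]
      simp only [List.foldl_cons, List.foldl_nil]
    rw [hBfold, hAfold]
    by_cases hball : c = "B" ∨ c = "R"
    · have hcdot : c ≠ "." := by rcases hball with h|h <;> subst h <;> decide
      have hcO : c ≠ "O" := by rcases hball with h|h <;> subst h <;> decide
      have hcR' : c ≠ "B" → c = "R" := by rcases hball with h|h <;> simp [h]
      by_cases hhole : hole = true
      · -- the ball falls into the persistent hole to the left
        have hland1 : 1 ≤ land := by
          rcases Nat.eq_zero_or_pos land with h0|h1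
          · have := (hzero h0).1; rw [hhole] at this; exact absurd this (by decide)
          · exact h1
        obtain ⟨v, hv1, hv2, hv3⟩ := hstopinv hland1
        have hvO : v = "O" := by
          rw [hhole] at hv3
          have := hv3.symm
          simpa using this
        have hstopPy : PySem.List.pyGet? r ((land:Int) - 1) = some v := by
          have hcast : ((land:Nat):Int) - 1 = ((land - 1 : Nat) : Int) := by omega
          rw [hcast, PySem.List.pyGet?_natCast, hv1]
        have hballeq := pv_ball_eq c r land n out hrnL hrn hdots v hstopPy hv2 (by omega)
          (fun h0 _ => absurd h0 (by omega))
        rw [if_pos hvO] at hballeq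
        have hgetDset : PySem.List.pyGetD (r.set n ".") (n:Int) "" = "." := by
          rw [PySem.List.pyGetD_natCast, List.getD_eq_getElem?_getD,
            List.getElem?_set_self hrnL]
          rfl
        have hAstep : pvStepA (some (r, out)) (n:Int) = some (r.set n ".", out ++ [c]) := by
          by_cases hcB : c = "B"
          · have e1 : (if PySem.List.pyGetD r (n:Int) "" = "B" then pvBallA "B" r (n:Int) out
                else some (r, out)) = some (r.set n ".", out ++ [c]) := by
              rw [PySem.List.pyGetD_natCast, hgetD, if_pos hcB, ← hcB]
              exact hballeq
            show (match (if PySem.List.pyGetD r (n:Int) "" = "B" then pvBallA "B" r (n:Int) out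
                else some (r, out)) with
              | none => none
              | some (r1, out1) =>
                if PySem.List.pyGetD r1 (n:Int) "" = "R" then pvBallA "R" r1 (n:Int) out1
                else some (r1, out1)) = some (r.set n ".", out ++ [c])
            rw [e1]
            dsimp only
            rw [hgetDset, if_neg (by decide : ("." : String) ≠ "R")]
          · have hcR := hcR' hcB
            have e1 : (if PySem.List.pyGetD r (n:Int) "" = "B" then pvBallA "B" r (n:Int) out
                else some (r, out)) = some (r, out) := by
              rw [PySem.List.pyGetD_natCast, hgetD, if_neg hcB]
            show (match (if PySem.List.pyGetD r (n:Int) "" = "B" then pvBallA "B" r (n:Int) out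
                else some (r, out)) with
              | none => none
              | some (r1, out1) =>
                if PySem.List.pyGetD r1 (n:Int) "" = "R" then pvBallA "R" r1 (n:Int) out1
                else some (r1, out1)) = some (r.set n ".", out ++ [c])
            rw [e1]
            dsimp only
            rw [PySem.List.pyGetD_natCast, hgetD, if_pos hcR, ← hcR]
            exact hballeq
        have hBstep : pvStepB (r, land, hole, out) n = (r.set n ".", land, hole, out ++ [c]) := by
          show (let c' := r.getD n "";
            if c' = "B" ∨ c' = "R" then
              if hole then (r.set n ".", land, hole, out ++ [c'])
              else ((r.set n ".").set land c', land + 1, hole, out)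
            else if c' ≠ "." then (r, n + 1, c' == "O", out)
            else (r, land, hole, out)) = (r.set n ".", land, hole, out ++ [c])
          simp only [hgetD]
          rw [if_pos hball, if_pos (by rw [hhole])]
        refine ⟨r.set n ".", land, hole, out ++ [c], hBstep, hAstep, by simp [hlen], by omega,
          ?_, ?_, ?_, ?_⟩
        · intro j hj1 hj2
          by_cases hjn : j = n
          · subst hjn; exact List.getElem?_set_self hrnL
          · rw [List.getElem?_set_ne (by omega : n ≠ j)]
            exact hdots j hj1 (by omega)
        · intro j hj
          rw [List.getElem?_set_ne (by omega : n ≠ j)]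
          exact hsuf j (by omega)
        · intro h0; exact absurd h0 (by omega)
        · intro _
          exact ⟨v, by rw [List.getElem?_set_ne (by omega : n ≠ land - 1)]; exact hv1, hv2, hv3⟩
      · -- no hole yet: the ball lands at the landing index
        have hhf : hole = false := by simpa using hhole
        -- establish the stop cell to the left of the landing index
        have hstopdata : ∃ v, PySem.List.pyGet? r ((land:Int) - 1) = some v ∧ v ≠ "." ∧ v ≠ "O" ∧
            (land = 0 → 0 < n → n + 1 < r.length) := by
          rcases Nat.eq_zero_or_pos land with hl0|hl1
          · subst hl0
            have hpre₀ : ∀ j, j < n → r₀[j]? = some "." := (hzero rfl).2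
            have hfind : r₀.find? (· != ".") = some c := pv_find_prefix r₀ n c hpre₀ hc hcdot
            have hcases : n + 1 < r₀.length ∨ (n = 0 ∧ r₀.length = 1) := by
              by_contra hcon
              push Not at hcon
              obtain ⟨h1, h2⟩ := hcon
              have hlast : n + 1 = r₀.length := by omega
              have hlen2 : 2 ≤ r₀.length := by
                rcases Nat.eq_zero_or_pos n with h|h
                · have := h2 h; omega
                · omega
              have hfil := pv_filter_single r₀ n c hpre₀ hc hcdot (fun j hj hjl => by omega)
              refine hNR ⟨hlen2, ?_⟩
              rcases hball with h|h
              · left; rw [← h]; exact hfil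
              · right; rw [← h]; exact hfil
            have hneg1 : ((0:Nat):Int) - 1 = -1 := by omega
            rcases hcases with hlt | ⟨hn0, hL1⟩
            · have hlen2 : 2 ≤ r₀.length := by omega
              obtain ⟨w, hw⟩ : ∃ w, r₀[r₀.length - 1]? = some w :=
                ⟨r₀[r₀.length - 1], List.getElem?_eq_getElem (by omega)⟩
              have hwlast : r₀.getLast? = some w := by
                rw [List.getLast?_eq_getElem?]; exact hw
              have hnotD : ¬(r₀.getLast? = some "." ∨ r₀.getLast? = some "O") := by
                intro hor
                refine hND ⟨hlen2, ?_, hor⟩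
                rcases hball with h|h
                · left; rw [← h]; exact hfind
                · right; rw [← h]; exact hfind
              push Not at hnotD
              have hwdot : w ≠ "." := by
                intro h; exact hnotD.1 (by rw [hwlast, h])
              have hwO : w ≠ "O" := by
                intro h; exact hnotD.2 (by rw [hwlast, h])
              refine ⟨w, ?_, hwdot, hwO, fun _ _ => by omega⟩
              rw [hneg1, PySem.List.pyGet?_neg_one, List.getLast?_eq_getElem?, hlen]
              rw [hsuf (r₀.length - 1) (by omega)]
              exact hw
            · subst hn0
              refine ⟨c, ?_, hcdot, hcO, fun _ h => absurd h (by omega)⟩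
              rw [hneg1, PySem.List.pyGet?_neg_one, List.getLast?_eq_getElem?, hlen, hL1]
              simpa using hrn
          · obtain ⟨v, hv1, hv2, hv3⟩ := hstopinv hl1
            have hvO : v ≠ "O" := by
              intro h
              rw [hhf] at hv3
              rw [h] at hv3
              exact absurd hv3.symm (by decide)
            refine ⟨v, ?_, hv2, hvO, fun h0 _ => absurd h0 (by omega)⟩
            have hcast : ((land:Nat):Int) - 1 = ((land - 1 : Nat) : Int) := by omega
            rw [hcast, PySem.List.pyGet?_natCast, hv1]
        obtain ⟨v, hstopPy, hvdot, hvO, hidx⟩ := hstopdata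
        have hballeq := pv_ball_eq c r land n out hrnL hrn hdots v hstopPy hvdot (by omega) hidx
        rw [if_neg hvO] at hballeq
        have hAstep : pvStepA (some (r, out)) (n:Int) =
            some ((r.set n ".").set land c, out) := by
          by_cases hcB : c = "B"
          · have e1 : (if PySem.List.pyGetD r (n:Int) "" = "B" then pvBallA "B" r (n:Int) out
                else some (r, out)) = some ((r.set n ".").set land c, out) := by
              rw [PySem.List.pyGetD_natCast, hgetD, if_pos hcB, ← hcB]
              exact hballeq
            show (match (if PySem.List.pyGetD r (n:Int) "" = "B" then pvBallA "B" r (n:Int) out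
                else some (r, out)) with
              | none => none
              | some (r1, out1) =>
                if PySem.List.pyGetD r1 (n:Int) "" = "R" then pvBallA "R" r1 (n:Int) out1
                else some (r1, out1)) = some ((r.set n ".").set land c, out)
            rw [e1]
            dsimp only
            rw [if_neg ?hne]
            case hne =>
              rw [PySem.List.pyGetD_natCast, List.getD_eq_getElem?_getD]
              by_cases hln : land = n
              · subst hln
                rw [List.getElem?_set_self (by simpa using hrnL)]
                simp [hcB]
              · rw [List.getElem?_set_ne (by omega : land ≠ n), List.getElem?_set_self hrnL]
                decide
          · have hcR := hcR' hcB
            have e1 : (if PySem.List.pyGetD r (n:Int) "" = "B" then pvBallA "B" r (n:Int) out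
                else some (r, out)) = some (r, out) := by
              rw [PySem.List.pyGetD_natCast, hgetD, if_neg hcB]
            show (match (if PySem.List.pyGetD r (n:Int) "" = "B" then pvBallA "B" r (n:Int) out
                else some (r, out)) with
              | none => none
              | some (r1, out1) =>
                if PySem.List.pyGetD r1 (n:Int) "" = "R" then pvBallA "R" r1 (n:Int) out1
                else some (r1, out1)) = some ((r.set n ".").set land c, out)
            rw [e1]
            dsimp only
            rw [PySem.List.pyGetD_natCast, hgetD, if_pos hcR, ← hcR]
            exact hballeq
        have hBstep : pvStepB (r, land, hole, out) n =
            ((r.set n ".").set land c, land + 1, hole, out) := by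
          show (let c' := r.getD n "";
            if c' = "B" ∨ c' = "R" then
              if hole then (r.set n ".", land, hole, out ++ [c'])
              else ((r.set n ".").set land c', land + 1, hole, out)
            else if c' ≠ "." then (r, n + 1, c' == "O", out)
            else (r, land, hole, out)) = ((r.set n ".").set land c, land + 1, hole, out)
          simp only [hgetD]
          rw [if_pos hball, if_neg (by rw [hhf]; exact Bool.false_ne_true)]
        refine ⟨(r.set n ".").set land c, land + 1, hole, out, hBstep, hAstep,
          by simp [hlen], by omega, ?_, ?_, ?_, ?_⟩
        · intro j hj1 hj2
          have hjland : j ≠ land := by omega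
          rw [List.getElem?_set_ne (by omega : land ≠ j)]
          by_cases hjn : j = n
          · subst hjn; exact List.getElem?_set_self hrnL
          · rw [List.getElem?_set_ne (by omega : n ≠ j)]
            exact hdots j (by omega) (by omega)
        · intro j hj
          rw [List.getElem?_set_ne (by omega : land ≠ j), List.getElem?_set_ne (by omega : n ≠ j)]
          exact hsuf j (by omega)
        · intro h0; exact absurd h0 (by omega)
        · intro _
          refine ⟨c, ?_, hcdot, ?_⟩
          · have : land + 1 - 1 = land := by omega
            rw [this, List.getElem?_set_self (by simpa using Nat.lt_of_le_of_lt hland hrnL)]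
          · rw [hhf]
            rcases hball with h|h <;> subst h <;> decide
    · -- not a ball
      push Not at hball
      have hAstep : pvStepA (some (r, out)) (n:Int) = some (r, out) := by
        have e1 : (if PySem.List.pyGetD r (n:Int) "" = "B" then pvBallA "B" r (n:Int) out
            else some (r, out)) = some (r, out) := by
          rw [PySem.List.pyGetD_natCast, hgetD, if_neg hball.1]
        show (match (if PySem.List.pyGetD r (n:Int) "" = "B" then pvBallA "B" r (n:Int) out
            else some (r, out)) with
          | none => none
          | some (r1, out1) =>
            if PySem.List.pyGetD r1 (n:Int) "" = "R" then pvBallA "R" r1 (n:Int) out1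
            else some (r1, out1)) = some (r, out)
        rw [e1]
        dsimp only
        rw [PySem.List.pyGetD_natCast, hgetD, if_neg hball.2]
      by_cases hdot : c = "."
      · have hBstep : pvStepB (r, land, hole, out) n = (r, land, hole, out) := by
          show (let c' := r.getD n "";
            if c' = "B" ∨ c' = "R" then
              if hole then (r.set n ".", land, hole, out ++ [c'])
              else ((r.set n ".").set land c', land + 1, hole, out)
            else if c' ≠ "." then (r, n + 1, c' == "O", out)
            else (r, land, hole, out)) = (r, land, hole, out)
          simp only [hgetD]
          rw [if_neg (by rintro (h|h); exact hball.1 h; exact hball.2 h),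
            if_neg (by simpa using hdot)]
        refine ⟨r, land, hole, out, hBstep, hAstep, hlen, by omega, ?_, ?_, ?_, hstopinv⟩
        · intro j hj1 hj2
          by_cases hjn : j = n
          · subst hjn; rw [hrn, hdot]
          · exact hdots j hj1 (by omega)
        · intro j hj
          exact hsuf j (by omega)
        · intro h0
          refine ⟨(hzero h0).1, fun j hj => ?_⟩
          by_cases hjn : j = n
          · subst hjn; rw [hc, hdot]
          · exact (hzero h0).2 j (by omega)
      · -- a blocker or a hole cell: reset the landing index
        have hBstep : pvStepB (r, land, hole, out) n = (r, n + 1, (c == "O"), out) := by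
          show (let c' := r.getD n "";
            if c' = "B" ∨ c' = "R" then
              if hole then (r.set n ".", land, hole, out ++ [c'])
              else ((r.set n ".").set land c', land + 1, hole, out)
            else if c' ≠ "." then (r, n + 1, c' == "O", out)
            else (r, land, hole, out)) = (r, n + 1, (c == "O"), out)
          simp only [hgetD]
          rw [if_neg (by rintro (h|h); exact hball.1 h; exact hball.2 h),
            if_pos (by simpa using hdot)]
        refine ⟨r, n + 1, (c == "O"), out, hBstep, hAstep, hlen, le_rfl, ?_, ?_, ?_, ?_⟩
        · intro j hj1 hj2; omega
        · intro j hj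
          exact hsuf j (by omega)
        · intro h0; exact absurd h0 (by omega)
        · intro _
          refine ⟨c, ?_, hdot, rfl⟩
          have : n + 1 - 1 = n := by omega
          rw [this, hrn]

theorem pv_row_eq (r₀ out₀ : List String) (hND : ¬ pvDRow r₀) (hNR : ¬ pvRaiseRow r₀) :
    pvRowA r₀ out₀ = some (pvRowB r₀ out₀) := by
  obtain ⟨r, land, hole, out, hB, hA, -, -, -, -, -, -⟩ :=
    pv_row_inv r₀ out₀ hND hNR r₀.length le_rfl
  unfold pvRowA
  rw [PySem.List.len_eq, PySem.List.pyRange_zero_natCast, List.foldl_map, hA]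
  unfold pvRowB
  rw [hB]

theorem pv_board_eq (tm : List (List String)) (acc : List (List String)) (out : List String)
    (hOK : ∀ rr ∈ tm, ¬ pvDRow rr ∧ ¬ pvRaiseRow rr) :
    tm.foldl (fun st row => match st with
      | none => none
      | some (a, o) => match pvRowA row o with
        | none => none
        | some (r, o') => some (a ++ [r], o')) (some (acc, out)) =
    some (tm.foldl (fun (st : List (List String) × List String) row =>
      let p := pvRowB row st.2
      (st.1 ++ [p.1], p.2)) (acc, out)) := by
  induction tm generalizing acc out with
  | nil => rfl
  | cons rr t ih =>
    have h := hOK rr (by simp)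
    simp only [List.foldl_cons]
    rw [pv_row_eq rr out h.1 h.2]
    dsimp only
    exact ih _ _ (fun x hx => hOK x (by simp [hx]))

-- ===== tightness machinery: on a D_-row A's column 0 ends '.', B's ends with the ball =====

def pvDRow2 (r : List String) : Prop :=
  2 ≤ r.length ∧
  (r.find? (· != ".") = some "B" ∨ r.find? (· != ".") = some "R") ∧
  r.getLast? = some "O"

-- the index where A's inner while loop stops when started at n (first non-'.' run boundary)
def pvStop (r : List String) : Nat → Nat
  | 0 => 0
  | m + 1 => if r[m]? = some "." then pvStop r m else m + 1

theorem pvStop_le (r : List String) (n : Nat) : pvStop r n ≤ n := by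
  induction n with
  | zero => exact le_rfl
  | succ m ih =>
    unfold pvStop
    split
    · omega
    · omega

theorem pvStop_dots (r : List String) (n : Nat) :
    ∀ j, pvStop r n ≤ j → j < n → r[j]? = some "." := by
  induction n with
  | zero => intro j _ hj; omega
  | succ m ih =>
    intro j h1 h2
    unfold pvStop at h1
    split at h1
    · rename_i hm
      by_cases hjm : j = m
      · subst hjm; exact hm
      · exact ih j h1 (by omega)
    · omega

theorem pvStop_boundary (r : List String) (n : Nat) :
    pvStop r n = 0 ∨ (1 ≤ pvStop r n ∧ r[pvStop r n - 1]? ≠ some ".") := by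
  induction n with
  | zero => exact Or.inl rfl
  | succ m ih =>
    unfold pvStop
    split
    · exact ih
    · rename_i hm
      right
      exact ⟨by omega, by simpa using hm⟩

-- the invariant A keeps on a D_-row once its leading ball has fallen into the far-end hole
def pvJA (L : Nat) (r : List String) : Prop :=
  r.length = L ∧ r[0]? = some "." ∧ r[L - 1]? = some "O"

theorem pv_stepA_noop (r out : List String) (n : Nat)
    (hB : r.getD n "" ≠ "B") (hR : r.getD n "" ≠ "R") :
    pvStepA (some (r, out)) (n : Int) = some (r, out) := by
  have e1 : (if PySem.List.pyGetD r (n:Int) "" = "B" then pvBallA "B" r (n:Int) out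
      else some (r, out)) = some (r, out) := by
    rw [PySem.List.pyGetD_natCast, if_neg hB]
  show (match (if PySem.List.pyGetD r (n:Int) "" = "B" then pvBallA "B" r (n:Int) out
      else some (r, out)) with
    | none => none
    | some (r1, out1) =>
      if PySem.List.pyGetD r1 (n:Int) "" = "R" then pvBallA "R" r1 (n:Int) out1
      else some (r1, out1)) = some (r, out)
  rw [e1]
  dsimp only
  rw [PySem.List.pyGetD_natCast, if_neg hR]

-- one pvBallA call preserves pvJA: the ball either parks right of a blocker (never column 0,
-- because column 0 can only be reached through the wrapped check, which sees the hole) or falls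
theorem pv_ballA_J (L : Nat) (Y : String) (r out : List String) (n : Nat)
    (hJ : pvJA L r) (hn1 : 1 ≤ n) (hn2 : n < L - 1) (hball : r[n]? = some Y)
    (hYB : Y = "B" ∨ Y = "R") :
    ∃ r' out', pvBallA Y r (n : Int) out = some (r', out') ∧ pvJA L r' ∧
      (r'[n]? = some "." ∨ r'[n]? = some Y) := by
  obtain ⟨hlen, h0, hO⟩ := hJ
  have hL2 : 2 ≤ L := by omega
  set b := pvStop r n with hb
  have hble : b ≤ n := pvStop_le r n
  have hdots := pvStop_dots r n
  have hYd : Y ≠ "." := by rcases hYB with h|h <;> subst h <;> decide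
  -- the stop value
  obtain ⟨v, hstop, hvd⟩ :
      ∃ v, PySem.List.pyGet? r ((b : Int) - 1) = some v ∧ v ≠ "." := by
    rcases pvStop_boundary r n with h0' | ⟨h1', h2'⟩
    · refine ⟨"O", ?_, by decide⟩
      rw [← hb] at h0'
      rw [h0']
      have : ((0:Nat) : Int) - 1 = -1 := by omega
      rw [this, PySem.List.pyGet?_neg_one, List.getLast?_eq_getElem?, hlen]
      exact hO
    · rw [← hb] at h1' h2'
      obtain ⟨v, hv⟩ : ∃ v, r[b - 1]? = some v :=
        ⟨r[b-1]'(by omega), List.getElem?_eq_getElem (by omega)⟩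
      refine ⟨v, ?_, fun hcon => h2' (by rw [hv, hcon])⟩
      have : ((b:Nat) : Int) - 1 = ((b - 1 : Nat) : Int) := by omega
      rw [this, PySem.List.pyGet?_natCast, hv]
  have hballeq := pv_ball_eq Y r b n out (by omega) hball
    (fun j hj1 hj2 => hdots j hj1 hj2) v hstop hvd hble
    (fun hb0 _ => by omega)
  by_cases hvO : v = "O"
  · rw [if_pos hvO] at hballeq
    refine ⟨r.set n ".", out ++ [Y], hballeq, ⟨by simp [hlen], ?_, ?_⟩, ?_⟩
    · rw [List.getElem?_set_ne (by omega : n ≠ 0)]; exact h0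
    · rw [List.getElem?_set_ne (by omega : n ≠ L - 1)]; exact hO
    · left; exact List.getElem?_set_self (by omega)
  · rw [if_neg hvO] at hballeq
    have hb1 : 1 ≤ b := by
      rcases pvStop_boundary r n with h0' | ⟨h1', _⟩
      · exfalso
        rw [← hb] at h0'
        apply hvO
        have : ((0:Nat) : Int) - 1 = -1 := by omega
        rw [h0', this, PySem.List.pyGet?_neg_one, List.getLast?_eq_getElem?, hlen, hO]
          at hstop
        exact (Option.some.injEq _ _).mp hstop.symm
      · rw [← hb] at h1'; exact h1'
    refine ⟨(r.set n ".").set b Y, out, hballeq, ⟨by simp [hlen], ?_, ?_⟩, ?_⟩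
    · rw [List.getElem?_set_ne (by omega : b ≠ 0), List.getElem?_set_ne (by omega : n ≠ 0)]
      exact h0
    · rw [List.getElem?_set_ne (by omega : b ≠ L - 1),
        List.getElem?_set_ne (by omega : n ≠ L - 1)]
      exact hO
    · by_cases hbn : b = n
      · right
        rw [hbn]
        exact List.getElem?_set_self (by simp only [List.length_set]; omega)
      · left
        rw [List.getElem?_set_ne (by omega : b ≠ n)]
        exact List.getElem?_set_self (by omega)

-- a full pvStepA at any index ≥ 1 preserves pvJA
theorem pv_stepA_J (L : Nat) (r out : List String) (n : Nat)
    (hJ : pvJA L r) (hn1 : 1 ≤ n) (hnL : n < L) :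
    ∃ r' out', pvStepA (some (r, out)) (n : Int) = some (r', out') ∧ pvJA L r' := by
  obtain ⟨hlen, h0, hO⟩ := hJ
  obtain ⟨c, hc⟩ : ∃ c, r[n]? = some c := ⟨r[n]'(by omega), List.getElem?_eq_getElem (by omega)⟩
  have hgetD : r.getD n "" = c := by rw [List.getD_eq_getElem?_getD, hc]; rfl
  by_cases hcb : c = "B" ∨ c = "R"
  · have hn2 : n < L - 1 := by
      rcases Nat.lt_or_ge n (L - 1) with h | h
      · exact h
      · exfalso
        have hnl : n = L - 1 := by omega
        rw [hnl, hO] at hc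
        have : c = "O" := (Option.some.injEq _ _).mp hc.symm
        rcases hcb with hh|hh <;> rw [hh] at this <;> exact absurd this (by decide)
    obtain ⟨r', out', hball, hJ', hcell⟩ := pv_ballA_J L c r out n ⟨hlen, h0, hO⟩ hn1 hn2 hc hcb
    by_cases hcB : c = "B"
    · have e1 : (if PySem.List.pyGetD r (n:Int) "" = "B" then pvBallA "B" r (n:Int) out
          else some (r, out)) = some (r', out') := by
        rw [PySem.List.pyGetD_natCast, hgetD, if_pos hcB, ← hcB]
        exact hball
      refine ⟨r', out', ?_, hJ'⟩
      show (match (if PySem.List.pyGetD r (n:Int) "" = "B" then pvBallA "B" r (n:Int) out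
          else some (r, out)) with
        | none => none
        | some (r1, out1) =>
          if PySem.List.pyGetD r1 (n:Int) "" = "R" then pvBallA "R" r1 (n:Int) out1
          else some (r1, out1)) = some (r', out')
      rw [e1]
      dsimp only
      rw [if_neg ?hne]
      case hne =>
        -- after the B-ball is processed, cell n holds '.' or 'B', never 'R'
        subst hcB
        rcases hcell with h | h
          <;> rw [PySem.List.pyGetD_natCast, List.getD_eq_getElem?_getD, h] <;> decide
    · have hcR : c = "R" := by rcases hcb with h|h; exact absurd h hcB; exact h
      have e1 : (if PySem.List.pyGetD r (n:Int) "" = "B" then pvBallA "B" r (n:Int) out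
          else some (r, out)) = some (r, out) := by
        rw [PySem.List.pyGetD_natCast, hgetD, if_neg hcB]
      refine ⟨r', out', ?_, hJ'⟩
      show (match (if PySem.List.pyGetD r (n:Int) "" = "B" then pvBallA "B" r (n:Int) out
          else some (r, out)) with
        | none => none
        | some (r1, out1) =>
          if PySem.List.pyGetD r1 (n:Int) "" = "R" then pvBallA "R" r1 (n:Int) out1
          else some (r1, out1)) = some (r', out')
      rw [e1]
      dsimp only
      rw [PySem.List.pyGetD_natCast, hgetD, if_pos hcR, ← hcR]
      exact hball
  · push Not at hcb
    exact ⟨r, out, pv_stepA_noop r out n (by rw [hgetD]; exact hcb.1)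
      (by rw [hgetD]; exact hcb.2), hlen, h0, hO⟩

theorem pv_stepB_eval (r : List String) (land : Nat) (hole : Bool) (out : List String) (i : Nat) :
    pvStepB (r, land, hole, out) i =
      (if r.getD i "" = "B" ∨ r.getD i "" = "R" then
        if hole then (r.set i ".", land, hole, out ++ [r.getD i ""])
        else ((r.set i ".").set land (r.getD i ""), land + 1, hole, out)
      else if r.getD i "" ≠ "." then (r, i + 1, (r.getD i "" == "O"), out)
      else (r, land, hole, out)) := rfl

theorem pvDRow2_decomp (r : List String) (h : pvDRow2 r) :
    ∃ X k, (X = "B" ∨ X = "R") ∧ k < r.length - 1 ∧ r[k]? = some X ∧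
      (∀ j, j < k → r[j]? = some ".") ∧ r[r.length - 1]? = some "O" ∧ 2 ≤ r.length := by
  obtain ⟨hL2, hfind, hlast⟩ := h
  have hO : r[r.length - 1]? = some "O" := by
    rw [← List.getLast?_eq_getElem?]; exact hlast
  have hget : ∃ X, (X = "B" ∨ X = "R") ∧ r.find? (· != ".") = some X := by
    rcases hfind with h|h
    · exact ⟨"B", Or.inl rfl, h⟩
    · exact ⟨"R", Or.inr rfl, h⟩
  obtain ⟨X, hX, hfX⟩ := hget
  obtain ⟨hpX, k, hk, hkX, hkpre⟩ := List.find?_eq_some_iff_getElem.mp hfX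
  have hkX' : r[k]? = some X := by rw [List.getElem?_eq_getElem hk, hkX]
  have hpre : ∀ j, j < k → r[j]? = some "." := by
    intro j hj
    have := hkpre j hj
    have hj' : j < r.length := by omega
    rw [List.getElem?_eq_getElem hj']
    simp only [Bool.not_eq_eq_eq_not, Bool.not_true, bne_eq_false_iff_eq] at this
    rw [this]
  refine ⟨X, k, hX, ?_, hkX', hpre, hO, hL2⟩
  rcases Nat.lt_or_ge k (r.length - 1) with h|h
  · exact h
  · exfalso
    have hkl : k = r.length - 1 := by omega
    rw [hkl, hO] at hkX'
    have : X = "O" := ((Option.some.injEq _ _).mp hkX').symm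
    rcases hX with hh|hh <;> rw [hh] at this <;> exact absurd this (by decide)

theorem pv_prefixA (r₀ out₀ : List String) (k : Nat)
    (hpre : ∀ j, j < k → r₀[j]? = some ".") :
    (List.range k).foldl (fun st (m : Nat) => pvStepA st (m : Int)) (some (r₀, out₀)) =
      some (r₀, out₀) := by
  induction k with
  | zero => rfl
  | succ k ih =>
    rw [List.range_succ, List.foldl_append, ih (fun j hj => hpre j (by omega))]
    simp only [List.foldl_cons, List.foldl_nil]
    have hg : r₀.getD k "" = "." := by
      rw [List.getD_eq_getElem?_getD, hpre k (by omega)]; rfl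
    exact pv_stepA_noop r₀ out₀ k (by rw [hg]; decide) (by rw [hg]; decide)

theorem pv_prefixB (r₀ out₀ : List String) (k : Nat)
    (hpre : ∀ j, j < k → r₀[j]? = some ".") :
    (List.range k).foldl pvStepB (r₀, 0, false, out₀) = (r₀, 0, false, out₀) := by
  induction k with
  | zero => rfl
  | succ k ih =>
    rw [List.range_succ, List.foldl_append, ih (fun j hj => hpre j (by omega))]
    simp only [List.foldl_cons, List.foldl_nil]
    rw [pv_stepB_eval]
    have hg : r₀.getD k "" = "." := by
      rw [List.getD_eq_getElem?_getD, hpre k (by omega)]; rfl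
    rw [hg, if_neg (by decide : ¬(("." : String) = "B" ∨ ("." : String) = "R")),
      if_neg (by decide : ¬(("." : String) ≠ "."))]

-- on a D_-row, A's scan drops the leading ball into the far-end hole: column 0 ends '.'
theorem pv_DrowA (r₀ out₀ : List String) (h : pvDRow2 r₀) :
    ∃ rA outA, pvRowA r₀ out₀ = some (rA, outA) ∧ rA[0]? = some "." := by
  obtain ⟨X, k, hX, hkL, hk, hpre, hO, hL2⟩ := pvDRow2_decomp r₀ h
  have hXd : X ≠ "." := by rcases hX with h'|h' <;> subst h' <;> decide
  have hXO : X ≠ "O" := by rcases hX with h'|h' <;> subst h' <;> decide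
  have hgetD : r₀.getD k "" = X := by rw [List.getD_eq_getElem?_getD, hk]; rfl
  have hstop : PySem.List.pyGet? r₀ (((0:Nat) : Int) - 1) = some "O" := by
    have : ((0:Nat) : Int) - 1 = -1 := by omega
    rw [this, PySem.List.pyGet?_neg_one, List.getLast?_eq_getElem?]
    exact hO
  have hballeq := pv_ball_eq X r₀ 0 k out₀ (by omega) hk
    (fun j _ hj => hpre j hj) "O" hstop (by decide) (by omega)
    (fun _ _ => by omega)
  rw [if_pos rfl] at hballeq
  have hgetDset : PySem.List.pyGetD (r₀.set k ".") (k:Int) "" = "." := by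
    rw [PySem.List.pyGetD_natCast, List.getD_eq_getElem?_getD,
      List.getElem?_set_self (by omega)]
    rfl
  have hstepk : pvStepA (some (r₀, out₀)) (k : Int) = some (r₀.set k ".", out₀ ++ [X]) := by
    by_cases hXB : X = "B"
    · have e1 : (if PySem.List.pyGetD r₀ (k:Int) "" = "B" then pvBallA "B" r₀ (k:Int) out₀
          else some (r₀, out₀)) = some (r₀.set k ".", out₀ ++ [X]) := by
        rw [PySem.List.pyGetD_natCast, hgetD, if_pos hXB, ← hXB]
        exact hballeq
      show (match (if PySem.List.pyGetD r₀ (k:Int) "" = "B" then pvBallA "B" r₀ (k:Int) out₀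
          else some (r₀, out₀)) with
        | none => none
        | some (r1, out1) =>
          if PySem.List.pyGetD r1 (k:Int) "" = "R" then pvBallA "R" r1 (k:Int) out1
          else some (r1, out1)) = some (r₀.set k ".", out₀ ++ [X])
      rw [e1]
      dsimp only
      rw [hgetDset, if_neg (by decide : ("." : String) ≠ "R")]
    · have hXR : X = "R" := by rcases hX with h'|h'; exact absurd h' hXB; exact h'
      have e1 : (if PySem.List.pyGetD r₀ (k:Int) "" = "B" then pvBallA "B" r₀ (k:Int) out₀
          else some (r₀, out₀)) = some (r₀, out₀) := by
        rw [PySem.List.pyGetD_natCast, hgetD, if_neg (by rw [hXR]; decide)]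
      show (match (if PySem.List.pyGetD r₀ (k:Int) "" = "B" then pvBallA "B" r₀ (k:Int) out₀
          else some (r₀, out₀)) with
        | none => none
        | some (r1, out1) =>
          if PySem.List.pyGetD r1 (k:Int) "" = "R" then pvBallA "R" r1 (k:Int) out1
          else some (r1, out1)) = some (r₀.set k ".", out₀ ++ [X])
      rw [e1]
      dsimp only
      rw [PySem.List.pyGetD_natCast, hgetD, if_pos hXR, ← hXR]
      exact hballeq
  have hJ1 : pvJA r₀.length (r₀.set k ".") := by
    refine ⟨by simp, ?_, ?_⟩
    · by_cases hk0 : k = 0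
      · subst hk0; exact List.getElem?_set_self (by omega)
      · rw [List.getElem?_set_ne (by omega : k ≠ 0)]
        exact hpre 0 (by omega)
    · rw [List.getElem?_set_ne (by omega : k ≠ r₀.length - 1)]
      exact hO
  have hlen1 : (r₀.set k ".").length = r₀.length := by simp
  have hphase2 : ∀ m, k + 1 ≤ m → m ≤ r₀.length →
      ∃ r' out', (List.range m).foldl (fun st (m' : Nat) => pvStepA st (m' : Int))
        (some (r₀, out₀)) = some (r', out') ∧ pvJA r₀.length r' := by
    intro m hm
    induction m, hm using Nat.le_induction with
    | base =>
      intro _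
      refine ⟨r₀.set k ".", out₀ ++ [X], ?_, hJ1⟩
      rw [List.range_succ, List.foldl_append, pv_prefixA r₀ out₀ k hpre]
      simp only [List.foldl_cons, List.foldl_nil]
      exact hstepk
    | succ m hm ih =>
      intro hmL
      obtain ⟨r', out', hfold, hJ'⟩ := ih (by omega)
      obtain ⟨r'', out'', hstep, hJ''⟩ :=
        pv_stepA_J r₀.length r' out' m hJ' (by omega) (by omega)
      refine ⟨r'', out'', ?_, hJ''⟩
      rw [List.range_succ, List.foldl_append, hfold]
      simp only [List.foldl_cons, List.foldl_nil]
      exact hstep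
  obtain ⟨rA, outA, hfold, hJA⟩ := hphase2 r₀.length (by omega) le_rfl
  refine ⟨rA, outA, ?_, hJA.2.1⟩
  unfold pvRowA
  rw [PySem.List.len_eq, PySem.List.pyRange_zero_natCast, List.foldl_map]
  exact hfold

-- on a D_-row, B parks the leading ball at column 0 and nothing dislodges it
theorem pv_DrowB (r₀ out₀ : List String) (h : pvDRow2 r₀) :
    ∃ X, X ≠ "." ∧ (pvRowB r₀ out₀).1[0]? = some X := by
  obtain ⟨X, k, hX, hkL, hk, hpre, hO, hL2⟩ := pvDRow2_decomp r₀ h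
  have hXd : X ≠ "." := by rcases hX with h'|h' <;> subst h' <;> decide
  have hgetD : r₀.getD k "" = X := by rw [List.getD_eq_getElem?_getD, hk]; rfl
  have hstepk : pvStepB (r₀, 0, false, out₀) k =
      ((r₀.set k ".").set 0 X, 1, false, out₀) := by
    rw [pv_stepB_eval, hgetD, if_pos hX, if_neg Bool.false_ne_true]
  have hJ1 : ((r₀.set k ".").set 0 X)[0]? = some X :=
    List.getElem?_set_self (by simp only [List.length_set]; omega)
  have hphase2 : ∀ m, k + 1 ≤ m →
      ∃ r' land' hole' out', (List.range m).foldl pvStepB (r₀, 0, false, out₀) =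
        (r', land', hole', out') ∧ r'[0]? = some X ∧ 1 ≤ land' := by
    intro m hm
    induction m, hm using Nat.le_induction with
    | base =>
      refine ⟨(r₀.set k ".").set 0 X, 1, false, out₀, ?_, hJ1, le_rfl⟩
      rw [List.range_succ, List.foldl_append, pv_prefixB r₀ out₀ k hpre]
      simp only [List.foldl_cons, List.foldl_nil]
      exact hstepk
    | succ m hm ih =>
      obtain ⟨r', land', hole', out', hfold, h0, hl1⟩ := ih
      have hm1 : 1 ≤ m := by omega
      obtain ⟨r2, land2, hole2, out2, hsval⟩ :
          ∃ a b c d, pvStepB (r', land', hole', out') m = (a, b, c, d) := ⟨_, _, _, _, rfl⟩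
      refine ⟨r2, land2, hole2, out2, ?_, ?_, ?_⟩
      · rw [List.range_succ, List.foldl_append, hfold]
        simp only [List.foldl_cons, List.foldl_nil]
        exact hsval
      · rw [pv_stepB_eval] at hsval
        split_ifs at hsval with h1 h2 h3 <;>
          (simp only [Prod.mk.injEq] at hsval; obtain ⟨e1, e2, e3, e4⟩ := hsval)
        · rw [← e1, List.getElem?_set_ne (by omega : m ≠ 0)]; exact h0
        · rw [← e1, List.getElem?_set_ne (by omega : land' ≠ 0),
            List.getElem?_set_ne (by omega : m ≠ 0)]
          exact h0
        · rw [← e1]; exact h0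
        · rw [← e1]; exact h0
      · rw [pv_stepB_eval] at hsval
        split_ifs at hsval <;>
          (simp only [Prod.mk.injEq] at hsval; obtain ⟨e1, e2, e3, e4⟩ := hsval) <;> omega
  obtain ⟨r', land', hole', out', hfold, h0, _⟩ := hphase2 r₀.length (by omega)
  refine ⟨X, hXd, ?_⟩
  unfold pvRowB
  rw [hfold]
  exact h0

def pvRowAdmissible (r : List String) : Prop :=
  ¬ pvRaiseRow r ∧
  ¬(2 ≤ r.length ∧ (r.find? (· != ".") = some "B" ∨ r.find? (· != ".") = some "R") ∧
    r.getLast? = some ".")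

theorem pv_board_tight (tm : List (List String)) :
    ∀ accA outA accB outB, (∀ rr ∈ tm, pvRowAdmissible rr) →
    ∃ gA oA gB oB,
      tm.foldl (fun st row => match st with
        | none => none
        | some (a, o) => match pvRowA row o with
          | none => none
          | some (r, o') => some (a ++ [r], o')) (some (accA, outA)) = some (accA ++ gA, oA) ∧
      tm.foldl (fun (st : List (List String) × List String) row =>
        let p := pvRowB row st.2
        (st.1 ++ [p.1], p.2)) (accB, outB) = (accB ++ gB, oB) ∧
      gA.length = tm.length ∧ gB.length = tm.length ∧
      (∀ i (hi : i < tm.length), pvDRow2 tm[i] →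
        ∃ ra rb, gA[i]? = some ra ∧ gB[i]? = some rb ∧ ra[0]? = some "." ∧
          ∃ Y, rb[0]? = some Y ∧ Y ≠ ".") := by
  induction tm with
  | nil =>
    intro accA outA accB outB _
    exact ⟨[], outA, [], outB, by simp, by simp, rfl, rfl, fun i hi => absurd hi (by simp)⟩
  | cons rr t ih =>
    intro accA outA accB outB hadm
    have hadm' : ∀ x ∈ t, pvRowAdmissible x := fun x hx => hadm x (by simp [hx])
    by_cases hd2 : pvDRow2 rr
    · obtain ⟨rA, outA1, hAr, hA0⟩ := pv_DrowA rr outA hd2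
      obtain ⟨Y, hYd, hB0⟩ := pv_DrowB rr outB hd2
      obtain ⟨gA, oA, gB, oB, hfA, hfB, hlA, hlB, hprop⟩ :=
        ih (accA ++ [rA]) outA1 (accB ++ [(pvRowB rr outB).1]) (pvRowB rr outB).2 hadm'
      refine ⟨rA :: gA, oA, (pvRowB rr outB).1 :: gB, oB, ?_, ?_, by simp [hlA], by simp [hlB], ?_⟩
      · simp only [List.foldl_cons]
        rw [hAr]
        rw [hfA]
        simp
      · simp only [List.foldl_cons]
        rw [hfB]
        simp
      · intro i hi hdi
        cases i with
        | zero =>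
          exact ⟨rA, (pvRowB rr outB).1, rfl, rfl, hA0, Y, hB0, hYd⟩
        | succ i =>
          obtain ⟨ra, rb, h1, h2, h3, h4⟩ := hprop i (by simpa using hi) (by simpa using hdi)
          exact ⟨ra, rb, by simpa using h1, by simpa using h2, h3, h4⟩
    · have hOK : ¬ pvDRow rr ∧ ¬ pvRaiseRow rr := by
        refine ⟨fun hD => ?_, (hadm rr (by simp)).1⟩
        rcases hD.2.2 with h|h
        · exact (hadm rr (by simp)).2 ⟨hD.1, hD.2.1, h⟩
        · exact hd2 ⟨hD.1, hD.2.1, h⟩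
      obtain ⟨gA, oA, gB, oB, hfA, hfB, hlA, hlB, hprop⟩ :=
        ih (accA ++ [(pvRowB rr outA).1]) (pvRowB rr outA).2
          (accB ++ [(pvRowB rr outB).1]) (pvRowB rr outB).2 hadm'
      refine ⟨(pvRowB rr outA).1 :: gA, oA, (pvRowB rr outB).1 :: gB, oB, ?_, ?_,
        by simp [hlA], by simp [hlB], ?_⟩
      · simp only [List.foldl_cons]
        rw [pv_row_eq rr outA hOK.1 hOK.2]
        rw [hfA]
        simp
      · simp only [List.foldl_cons]
        rw [hfB]
        simp
      · intro i hi hdi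
        cases i with
        | zero => exact absurd hdi hd2
        | succ i =>
          obtain ⟨ra, rb, h1, h2, h3, h4⟩ := hprop i (by simpa using hi) (by simpa using hdi)
          exact ⟨ra, rb, by simpa using h1, by simpa using h2, h3, h4⟩

-- ===== VERDICT (by name: the statement is the Claim_ definition above) =====
theorem tilt_left_spec : Claim_unchanged_tilt_left := by
  intro tm hDom hPre hND
  have hOK : ∀ rr ∈ tm, ¬ pvDRow rr ∧ ¬ pvRaiseRow rr := by
    intro rr hrr
    constructor
    · intro hD
      rcases hD.2.2 with hlast | hlast
      · exact (hPre rr hrr).2 ⟨hD.1, hD.2.1, hlast⟩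
      · exact hND ⟨rr, hrr, hD.1, hD.2.1, hlast⟩
    · intro hR; exact (hPre rr hrr).1 ⟨hR.1, hR.2⟩
  unfold tilt_left tilt_left_alt
  rw [pv_board_eq tm [] [] hOK]

theorem tilt_left_changed : Claim_changed_tilt_left := by
  unfold Claim_changed_tilt_left; decide

theorem tilt_left_tight : Claim_exact_tilt_left := by
  intro tm hDom hPre hD heq
  have hadm : ∀ rr ∈ tm, pvRowAdmissible rr :=
    fun rr hrr => ⟨(hPre rr hrr).1, (hPre rr hrr).2⟩
  obtain ⟨rr, hrr, hrow⟩ := hD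
  obtain ⟨i, hi, hieq⟩ := List.mem_iff_getElem.mp hrr
  obtain ⟨gA, oA, gB, oB, hfA, hfB, hlA, hlB, hprop⟩ := pv_board_tight tm [] [] [] [] hadm
  have h1 : tilt_left tm = (gA, oA) := by
    unfold tilt_left
    rw [hfA]
    simp
  have h2 : tilt_left_alt tm = (gB, oB) := by
    unfold tilt_left_alt
    rw [hfB]
    simp
  obtain ⟨ra, rb, hga, hgb, hra0, Y, hrb0, hYd⟩ := hprop i hi (by rw [hieq]; exact hrow)
  rw [h1, h2] at heq
  have hgg : gA = gB := (Prod.mk.injEq _ _ _ _).mp heq |>.1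
  rw [hgg, hgb] at hga
  have : ra = rb := ((Option.some.injEq _ _).mp hga).symm
  rw [this, hrb0] at hra0
  exact hYd ((Option.some.injEq _ _).mp hra0)
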